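-- pv_equiv track=rewrite | github.com/Tolmeton/Hegemonikon | 10_知性｜Nous/04_企画｜Boulēsis/14_忘却｜Lethe/experiments/structural_formula_v3.py | longest_unique_pattern_filter
-- ===== SOURCE A (Python) =====
-- def longest_unique_pattern_filter(
--     ranked_patterns: list[str],
--     top_k: int,
-- ) -> list[str]:
--     """部分文字列関係にあるパターン対から高 enrichment 側のみ残す。
--
--     問題: "CTRL FUSE COMPOSE" が "CTRL FUSE COMPOSE COMPOSE CTRL" の部分列
--     → 両方を特徴量にすると feature_short ⊇ feature_long で collinearity
--
--     アルゴリズム: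
--     - enrichment 降順で処理 (ranked_patterns は enrichment 降順であること)
--     - pattern を選択すると、それとの部分文字列関係にある全候補を除外
--     - トークン境界を保証するため " "+pattern+" " の string matching を使用
--     """
--     selected = []
--     excluded: set[str] = set()
--
--     for pattern in ranked_patterns:
--         if pattern in excluded:
--             continue
--         selected.append(pattern)
--         if len(selected) >= top_k:
--             break
--         # この pattern と部分文字列関係にある全候補を除外
--         pat_padded = " " + pattern + " "
--         for other in ranked_patterns:
--             if other == pattern or other in excluded:
--                 continue
--             oth_padded = " " + other + " "
--             # pattern ⊂ other (pattern が other の部分列) または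
--             # other ⊂ pattern (other が pattern の部分列)
--             if pat_padded in oth_padded or oth_padded in pat_padded:
--                 excluded.add(other)
--
--     return selected
-- ===== SOURCE B (Python) =====
-- def longest_unique_pattern_filter(
--     ranked_patterns: list[str],
--     top_k: int,
-- ) -> list[str]:
--     """Greedy filter, restructured: instead of a growing `excluded` set that is
--     re-tested while rescanning the full list, keep only the still-alive
--     candidates and shrink that list with one filter per selection."""
--     selected = []
--     remaining = ranked_patterns
--     while remaining:
--         head = remaining[0]
--         selected.append(head)
--         if top_k - len(selected) <= 0:
--             break
--         head_padded = " " + head + " "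
--         remaining = [
--             o for o in remaining[1:]
--             if o == head
--             or (head_padded not in " " + o + " " and " " + o + " " not in head_padded)
--         ]
--     return selected
-- ===== Notes on version B (the rewrite author's own statement) =====
-- stated objective: simpler
-- what changed: Replaced the growing excluded-set plus repeated full-list rescans (skip checks in both loops) by a shrinking remaining-candidates list that is filtered once per selection, with no exclusion set at all.
import Mathlib
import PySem

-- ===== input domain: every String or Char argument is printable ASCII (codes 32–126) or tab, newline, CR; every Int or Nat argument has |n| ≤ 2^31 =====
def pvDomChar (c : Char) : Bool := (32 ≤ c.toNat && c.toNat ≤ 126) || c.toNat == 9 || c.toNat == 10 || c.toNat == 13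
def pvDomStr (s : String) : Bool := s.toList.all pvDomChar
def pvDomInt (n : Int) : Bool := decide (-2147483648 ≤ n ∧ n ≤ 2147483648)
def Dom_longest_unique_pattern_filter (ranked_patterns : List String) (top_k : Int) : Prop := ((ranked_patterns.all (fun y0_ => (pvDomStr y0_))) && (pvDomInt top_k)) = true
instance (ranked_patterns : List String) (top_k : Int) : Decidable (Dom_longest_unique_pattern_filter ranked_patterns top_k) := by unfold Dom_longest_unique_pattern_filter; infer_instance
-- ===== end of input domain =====

-- B replaces A's excluded-set bookkeeping (with rescans of the full list) by one
-- filter of the still-alive candidates per selection: simpler, same results.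

-- shared primitive: Python's  " "+p+" " in " "+o+" "  (token-boundary substring test)
def pvPad (p : String) : List Char := ' ' :: (p.toList ++ [' '])
def pvRel (p o : String) : Bool :=
  PySem.Chars.isIn (pvPad p) (pvPad o) || PySem.Chars.isIn (pvPad o) (pvPad p)

-- ===== PORT A =====
-- inner 'for other in ranked_patterns' loop
def pvInnerA (p : String) (all : List String) (exc : PySem.Set String) : PySem.Set String :=
  all.foldl (fun exc other =>
    if other == p || PySem.Set.contains exc other then exc
    else if pvRel p other then PySem.Set.add exc other else exc) exc

-- outer 'for pattern in ranked_patterns' loop with its break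
def pvLoopA (all : List String) (top_k : Int) :
    List String → List String → PySem.Set String → List String
  | [], sel, _ => sel
  | p :: rest, sel, exc =>
    if PySem.Set.contains exc p then pvLoopA all top_k rest sel exc
    else
      let sel' := sel ++ [p]
      if top_k ≤ (sel'.length : Int) then sel'
      else pvLoopA all top_k rest sel' (pvInnerA p all exc)

def longest_unique_pattern_filter (ranked_patterns : List String) (top_k : Int) : List String :=
  pvLoopA ranked_patterns top_k ranked_patterns [] PySem.Set.empty

-- ===== PORT B =====
-- the 'while remaining' loop of Source B
def pvAltGo (top_k : Int) (sel : List String) (remaining : List String) : List String :=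
  match remaining with
  | [] => sel
  | hd :: tl =>
    let sel' := sel ++ [hd]
    if top_k - (sel'.length : Int) ≤ 0 then sel'
    else pvAltGo top_k sel' (tl.filter (fun o => o == hd || !pvRel hd o))
termination_by remaining.length
decreasing_by
  simp only [List.length_unattach]
  exact Nat.lt_succ_of_le (le_trans (List.length_filter_le _ _) (by simp))

def longest_unique_pattern_filter_alt (ranked_patterns : List String) (top_k : Int) : List String :=
  pvAltGo top_k [] ranked_patterns

-- ===== PRECONDITION & SPEC =====
def Spec_longest_unique_pattern_filter (ranked_patterns : List String) (top_k : Int) (out : List String) : Prop := out = longest_unique_pattern_filter_alt ranked_patterns top_k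
instance (ranked_patterns : List String) (top_k : Int) (out : List String) : Decidable (Spec_longest_unique_pattern_filter ranked_patterns top_k out) := by unfold Spec_longest_unique_pattern_filter; infer_instance

-- ===== CLAIM (what is proved, stated in full; the proofs are below) =====
def Claim_equal_longest_unique_pattern_filter : Prop := ∀ (ranked_patterns : List String) (top_k : Int), Dom_longest_unique_pattern_filter ranked_patterns top_k → Spec_longest_unique_pattern_filter ranked_patterns top_k (longest_unique_pattern_filter ranked_patterns top_k)

-- ===== LEMMAS AND PROOFS =====

theorem pvAltGo_nil (k : Int) (sel : List String) : pvAltGo k sel [] = sel := by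
  rw [pvAltGo.eq_def]

theorem pvAltGo_cons (k : Int) (sel : List String) (hd : String) (tl : List String) :
    pvAltGo k sel (hd :: tl)
      = (if k - (((sel ++ [hd]).length : Nat) : Int) ≤ 0 then sel ++ [hd]
         else pvAltGo k (sel ++ [hd]) (tl.filter (fun o => o == hd || !pvRel hd o))) := by
  rw [pvAltGo.eq_def]

-- membership in the excluded set after A's inner loop
theorem pvInnerA_mem (p : String) (all : List String) (exc : PySem.Set String) (s : String) :
    s ∈ pvInnerA p all exc ↔ s ∈ exc ∨ (s ∈ all ∧ s ≠ p ∧ pvRel p s = true) := by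
  induction all generalizing exc with
  | nil => simp [pvInnerA]
  | cons o rest ih =>
    simp only [pvInnerA, List.foldl_cons] at *
    by_cases hskip : (o == p || PySem.Set.contains exc o) = true
    · rw [if_pos hskip, ih]
      rcases Bool.or_eq_true_iff.1 hskip with h | h
      · have hop : o = p := by simpa using h
        subst hop
        constructor
        · rintro (h1 | ⟨h1, h2, h3⟩)
          · exact Or.inl h1
          · exact Or.inr ⟨List.mem_cons_of_mem _ h1, h2, h3⟩
        · rintro (h1 | ⟨h1, h2, h3⟩)
          · exact Or.inl h1
          · rcases List.mem_cons.1 h1 with h1 | h1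
            · exact absurd h1 h2
            · exact Or.inr ⟨h1, h2, h3⟩
      · have hoexc : o ∈ exc := (PySem.Set.contains_iff _ _).1 h
        constructor
        · rintro (h1 | ⟨h1, h2, h3⟩)
          · exact Or.inl h1
          · exact Or.inr ⟨List.mem_cons_of_mem _ h1, h2, h3⟩
        · rintro (h1 | ⟨h1, h2, h3⟩)
          · exact Or.inl h1
          · rcases List.mem_cons.1 h1 with h1 | h1
            · exact Or.inl (h1 ▸ hoexc)
            · exact Or.inr ⟨h1, h2, h3⟩
    · rw [if_neg hskip]
      have hop : o ≠ p := by
        intro h; exact hskip (by simp [h])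
      by_cases hrel : pvRel p o = true
      · rw [if_pos hrel, ih]
        constructor
        · rintro (h1 | ⟨h1, h2, h3⟩)
          · rcases (PySem.Set.mem_add _ _ _).1 h1 with h1 | h1
            · exact Or.inl h1
            · exact Or.inr ⟨h1 ▸ List.mem_cons_self, h1 ▸ hop, h1 ▸ hrel⟩
          · exact Or.inr ⟨List.mem_cons_of_mem _ h1, h2, h3⟩
        · rintro (h1 | ⟨h1, h2, h3⟩)
          · exact Or.inl ((PySem.Set.mem_add _ _ _).2 (Or.inl h1))
          · rcases List.mem_cons.1 h1 with h1 | h1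
            · exact Or.inl ((PySem.Set.mem_add _ _ _).2 (Or.inr h1))
            · exact Or.inr ⟨h1, h2, h3⟩
      · rw [if_neg hrel, ih]
        constructor
        · rintro (h1 | ⟨h1, h2, h3⟩)
          · exact Or.inl h1
          · exact Or.inr ⟨List.mem_cons_of_mem _ h1, h2, h3⟩
        · rintro (h1 | ⟨h1, h2, h3⟩)
          · exact Or.inl h1
          · rcases List.mem_cons.1 h1 with h1 | h1
            · exact absurd (h1 ▸ h3) hrel
            · exact Or.inr ⟨h1, h2, h3⟩

theorem pv_contains_eq_decide (t : PySem.Set String) (s : String) :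
    PySem.Set.contains t s = decide (s ∈ t) := by
  by_cases h : s ∈ t
  · simp [h]
  · have : PySem.Set.contains t s = false := by
      cases hc : PySem.Set.contains t s
      · rfl
      · exact absurd ((PySem.Set.contains_iff _ _).1 hc) h
    simp [h]

-- the two loops agree: A's pending-with-excluded-set equals B's filtered remaining
theorem pvLoop_eq_altGo (all : List String) (k : Int) :
    ∀ pending sel exc, (∀ x ∈ pending, x ∈ all) →
      pvLoopA all k pending sel exc
        = pvAltGo k sel (pending.filter (fun o => !PySem.Set.contains exc o)) := by
  intro pending
  induction pending with
  | nil => intro sel exc _; simp [pvLoopA, pvAltGo_nil]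
  | cons p rest ih =>
    intro sel exc hsub
    by_cases hp : PySem.Set.contains exc p = true
    · simp only [pvLoopA, List.filter_cons, hp, Bool.not_true,
        Bool.false_eq_true, if_false]
      exact ih sel exc (fun x hx => hsub x (List.mem_cons_of_mem _ hx))
    · have hpf : PySem.Set.contains exc p = false := by
        revert hp; cases PySem.Set.contains exc p <;> simp
      simp only [pvLoopA, hpf, Bool.false_eq_true, if_false, List.filter_cons,
        Bool.not_false, if_true]
      rw [pvAltGo_cons]
      by_cases hk : k ≤ (((sel ++ [p]).length : Nat) : Int)
      · rw [if_pos hk, if_pos (by omega)]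
      · rw [if_neg hk, if_neg (by omega)]
        rw [ih (sel ++ [p]) (pvInnerA p all exc)
              (fun x hx => hsub x (List.mem_cons_of_mem _ hx))]
        congr 1
        rw [List.filter_filter]
        apply List.filter_congr
        intro o ho
        have hoall : o ∈ all := hsub o (List.mem_cons_of_mem _ ho)
        rw [pv_contains_eq_decide, pv_contains_eq_decide]
        simp only [pvInnerA_mem]
        by_cases h1 : o ∈ exc
        · simp [h1]
        · by_cases h2 : o = p
          · subst h2; simp [h1, hoall]
          · cases h3 : pvRel p o
            · simp [h1, h2, hoall]
            · simp [h1, h2, hoall]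

-- ===== VERDICT (by name: the statement is the Claim_ definition above) =====
theorem longest_unique_pattern_filter_spec : Claim_equal_longest_unique_pattern_filter := by
  intro rp k _
  show longest_unique_pattern_filter rp k = longest_unique_pattern_filter_alt rp k
  unfold longest_unique_pattern_filter longest_unique_pattern_filter_alt
  rw [pvLoop_eq_altGo rp k rp [] PySem.Set.empty (fun x hx => hx)]
  congr 1
  simp [PySem.Set.empty]
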